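-- pv_equiv track=rewrite | github.com/heisje/Algorithm_Study | Dohyeon/2022.12.08/[PGS]_3차_파일명_정렬.py | solution
-- ===== SOURCE A (Python) =====
-- def solution(files):
--     head_dict = {}
--     answer = []
--     for i in range(len(files)):
--         head_name = ""
--         number_name = ""
--         number_start = 0
--         tail_start = 0
--         for j in range(len(files[i])):
--             if files[i][j].isnumeric():
--                 number_start = j
--                 break
--             head_name = head_name + files[i][j]
--
--         for j in range(number_start, len(files[i])):
--             if not files[i][j].isnumeric():
--                 tail_start = j
--                 break
--             number_name = number_name + files[i][j]
--
--
--         try: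
--             check = head_dict[head_name.upper()]
--             head_dict[head_name.upper()].append([int(number_name), i])
--
--         except KeyError:
--             head_dict[head_name.upper()] = [[int(number_name), i]]
--
--
--     # key list를 뽑아서 키 안의 값들을 numbername 별로 정리하자, 만약 같을 경우 들어온 순서니까 조심
--     # 이후 key list를 소팅한 후 소팅된 키리스 안의 값들을 하나씩 집어넣으면 됨
--     name_key_list = list(head_dict.keys())
--     name_key_list.sort()
--     for i in range(len(name_key_list)):
--         head_dict[name_key_list[i]].sort(key=lambda x:x[0])
--         for j in range(len(head_dict[name_key_list[i]])):
--             answer.append(files[head_dict[name_key_list[i]][j][1]])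
--
--
--     return answer
-- ===== SOURCE B (Python) =====
-- def solution(files):
--     def sort_key(name):
--         head = []
--         i = 0
--         while i < len(name) and not name[i].isnumeric():
--             head.append(name[i])
--             i += 1
--         j = i
--         while j < len(name) and name[j].isnumeric():
--             j += 1
--         return (''.join(head).upper(), int(name[i:j]))
--     return sorted(files, key=sort_key)
-- ===== Notes on version B (the rewrite author's own statement) =====
-- stated objective: simpler
-- what changed: Replaced A's group-into-a-dict, sort the key list, then sort each group and concatenate with a single stable sorted(files, key=(head.upper(), int(number))) using one tuple key; parsing is done by index scanning and a slice instead of A's string concatenation loops.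
import Mathlib
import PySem

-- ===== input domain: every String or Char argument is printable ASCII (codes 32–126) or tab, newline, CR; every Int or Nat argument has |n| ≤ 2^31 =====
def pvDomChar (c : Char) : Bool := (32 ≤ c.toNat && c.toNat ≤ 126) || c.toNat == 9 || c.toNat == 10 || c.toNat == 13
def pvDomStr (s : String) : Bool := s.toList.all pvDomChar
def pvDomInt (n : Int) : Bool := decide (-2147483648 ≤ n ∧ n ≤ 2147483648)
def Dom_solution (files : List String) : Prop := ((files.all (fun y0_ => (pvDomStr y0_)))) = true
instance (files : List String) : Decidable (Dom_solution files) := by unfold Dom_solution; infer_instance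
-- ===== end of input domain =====

-- B replaces A's dict-grouping + sorted key list + per-group sorts by ONE stable sort with a
-- (head.upper(), int(number)) tuple key (objective: simpler).

-- ===== PORT A =====
-- A's first inner 'for j … break' loop: accumulate head chars until the first digit; the returned
-- rest starts at number_start.  (When the string has no digit, A leaves number_start = 0 and its
-- second loop still collects "" because the first char is not a digit — the same "" returned here;
-- such inputs are outside Pre_ anyway, since int('') raises.)
def aFirstLoop : List Char → List Char → (List Char × List Char)
  | [], head => (head, [])
  | c :: cs, head =>
    if PySem.Chars.isdigit c then (head, c :: cs) else aFirstLoop cs (head ++ [c])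

-- A's second inner 'for j in range(number_start, …) … break' loop: consecutive digits.
def aSecondLoop : List Char → List Char → List Char
  | [], num => num
  | c :: cs, num =>
    if !PySem.Chars.isdigit c then num else aSecondLoop cs (num ++ [c])

def solution (files : List String) : List String :=
  let d : PySem.Dict String (List (Int × Int)) :=
    (PySem.List.pyRange 0 (PySem.List.len files) 1).foldl (fun d i =>
      let cs := (PySem.List.pyGetD files i "").toList
      let pr := aFirstLoop cs []
      let num := aSecondLoop pr.2 []
      let key : String := String.ofList (PySem.Chars.upper pr.1)  -- head_name.upper()
      let n : Int := (PySem.Int.ofChars? num).getD 0              -- int(number_name); ValueError (num = []) is outside Pre_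
      match d.get? key with                                       -- try: … .append(…)  except KeyError: new singleton list
      | some l => d.insert key (l ++ [(n, i)])
      | none   => d.insert key [(n, i)]) PySem.Dict.empty
  let keyList := PySem.List.sorted d.keys (fun k => k)            -- name_key_list.sort()
  keyList.foldl (fun ans k =>
    (PySem.List.sorted (d.getD k []) (fun x => x.1)).foldl        -- .sort(key=lambda x: x[0])
      (fun ans e => ans ++ [PySem.List.pyGetD files e.2 ""]) ans) []

-- ===== PORT B =====
-- Source B's first while loop: i = number of leading non-digit chars (the head length).
def bHeadLen : List Char → Nat
  | [] => 0
  | c :: cs => if PySem.Chars.isdigit c then 0 else bHeadLen cs + 1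

-- Source B's second while loop: j - i = number of consecutive digits from position i.
def bNumLen : List Char → Nat
  | [] => 0
  | c :: cs => if PySem.Chars.isdigit c then bNumLen cs + 1 else 0

def bKey1 (name : String) : String :=
  String.ofList (PySem.Chars.upper (name.toList.take (bHeadLen name.toList)))

def bKey2 (name : String) : Int :=
  let cs := name.toList
  let rest := cs.drop (bHeadLen cs)
  (PySem.Int.ofChars? (rest.take (bNumLen rest))).getD 0   -- int(name[i:j]); ValueError outside Pre_

def solution_alt (files : List String) : List String :=
  PySem.List.sorted2 files bKey1 bKey2

-- ===== PRECONDITION & SPEC =====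
-- Pre_ excludes exactly the inputs on which the Python raises: a filename without any decimal
-- digit (including "") makes both A and B call int('') → ValueError.
def Pre_solution (files : List String) : Prop :=
  ∀ f ∈ files, f.toList.any PySem.Chars.isdigit = true
instance (files : List String) : Decidable (Pre_solution files) := by unfold Pre_solution; infer_instance

def pvWitness_solution : List String := ["img12.png", "IMG10 xx", "img2", "3"]

def Spec_solution (files : List String) (out : List String) : Prop := out = solution_alt files
instance (files : List String) (out : List String) : Decidable (Spec_solution files out) := by unfold Spec_solution; infer_instance

-- ===== CLAIM (what is proved, stated in full; the proofs are below) =====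
def Claim_equal_solution : Prop := ∀ (files : List String), Dom_solution files → Pre_solution files → Spec_solution files (solution files)

-- ===== LEMMAS AND PROOFS =====

-- The canonical parse results both ports compute: head.upper() and int(number).
def pvK1 (f : String) : String :=
  String.ofList (PySem.Chars.upper (f.toList.takeWhile (fun c => !PySem.Chars.isdigit c)))
def pvK2 (f : String) : Int :=
  (PySem.Int.ofChars?
    ((f.toList.dropWhile (fun c => !PySem.Chars.isdigit c)).takeWhile
      (fun c => PySem.Chars.isdigit c))).getD 0
def pvE (files : List String) : List (Int × String) := PySem.List.enumerate files
-- The strict total key: (head.upper(), number, original index) lexicographically.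
def pvKB (p : Int × String) : Lex (Lex (String × Int) × Int) :=
  toLex (toLex (pvK1 p.2, pvK2 p.2), p.1)
-- A's output, as the key-sorted concatenation of the per-key sorted groups of enumerate(files).
def pvLA (files : List String) : List (Int × String) :=
  (PySem.List.sorted (PySem.Set.ofList ((pvE files).map (fun p => pvK1 p.2))) (fun s => s)).flatMap
    (fun s => PySem.List.sorted ((pvE files).filter (fun p => pvK1 p.2 == s)) (fun p => pvK2 p.2))

lemma aFirstLoop_eq (cs acc : List Char) :
    aFirstLoop cs acc = (acc ++ cs.takeWhile (fun c => !PySem.Chars.isdigit c),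
                         cs.dropWhile (fun c => !PySem.Chars.isdigit c)) := by
  induction cs generalizing acc with
  | nil => simp [aFirstLoop]
  | cons c cs ih =>
    by_cases h : PySem.Chars.isdigit c = true <;>
      simp [aFirstLoop, h, ih]

lemma aSecondLoop_eq (cs acc : List Char) :
    aSecondLoop cs acc = acc ++ cs.takeWhile (fun c => PySem.Chars.isdigit c) := by
  induction cs generalizing acc with
  | nil => simp [aSecondLoop]
  | cons c cs ih =>
    by_cases h : PySem.Chars.isdigit c = true <;> simp [aSecondLoop, h, ih]

lemma bHeadLen_eq (cs : List Char) :
    bHeadLen cs = (cs.takeWhile (fun c => !PySem.Chars.isdigit c)).length := by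
  induction cs with
  | nil => simp [bHeadLen]
  | cons c cs ih => by_cases h : PySem.Chars.isdigit c = true <;> simp [bHeadLen, h, ih]

lemma bNumLen_eq (cs : List Char) :
    bNumLen cs = (cs.takeWhile (fun c => PySem.Chars.isdigit c)).length := by
  induction cs with
  | nil => simp [bNumLen]
  | cons c cs ih => by_cases h : PySem.Chars.isdigit c = true <;> simp [bNumLen, h, ih]

lemma take_takeWhile_length {α : Type} (p : α → Bool) (l : List α) :
    l.take (l.takeWhile p).length = l.takeWhile p := by
  induction l with
  | nil => simp
  | cons c cs ih => by_cases h : p c <;> simp [h, ih]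

lemma drop_takeWhile_length {α : Type} (p : α → Bool) (l : List α) :
    l.drop (l.takeWhile p).length = l.dropWhile p := by
  induction l with
  | nil => simp
  | cons c cs ih => by_cases h : p c <;> simp [h, ih]

lemma bKey1_eq (f : String) : bKey1 f = pvK1 f := by
  rw [bKey1, pvK1, bHeadLen_eq, take_takeWhile_length]

lemma bKey2_eq (f : String) : bKey2 f = pvK2 f := by
  rw [bKey2, pvK2]
  simp only [bHeadLen_eq, bNumLen_eq, take_takeWhile_length, drop_takeWhile_length]

-- sorted2 with a tuple key is sorted with the corresponding lexicographic key.
lemma sorted2_eq_sorted_lex {α κ₁ κ₂ : Type} [LinearOrder κ₁] [LinearOrder κ₂]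
    (xs : List α) (k1 : α → κ₁) (k2 : α → κ₂) :
    PySem.List.sorted2 xs k1 k2 = PySem.List.sorted xs (fun x => toLex (k1 x, k2 x)) := by
  rw [PySem.List.sorted_eq_foldl_insertBy]
  simp only [PySem.List.sorted2, if_neg (by decide : ¬ (false = true))]
  congr 1
  funext acc x
  congr 1
  funext a b
  have h0 : (toLex (k1 a, k2 a) < toLex (k1 b, k2 b)) ↔
      (k1 a < k1 b ∨ k1 a = k1 b ∧ k2 a < k2 b) := Prod.Lex.toLex_lt_toLex
  rw [decide_eq_decide.mpr h0]
  · rcases lt_trichotomy (k1 a) (k1 b) with h | h | h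
    · simp [h, asymm h]
    · simp [h]
    · simp [asymm h, h, ne_of_gt h]
  · infer_instance

lemma insertBy_map {α β : Type} (f : α → β) (bf : β → β → Bool) (x : α) (acc : List α) :
    PySem.List.insertBy bf (f x) (acc.map f)
      = (PySem.List.insertBy (fun a b => bf (f a) (f b)) x acc).map f := by
  induction acc with
  | nil => simp [PySem.List.insertBy]
  | cons y ys ih => by_cases h : bf (f x) (f y) <;> simp [PySem.List.insertBy, h, ih]

-- sorted commutes with map when the key factors through the map.
lemma sorted_map_comm {α β κ : Type} [LT κ] [DecidableLT κ]
    (f : α → β) (k : β → κ) (l : List α) :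
    PySem.List.sorted (l.map f) k = (PySem.List.sorted l (fun a => k (f a))).map f := by
  rw [PySem.List.sorted_eq_foldl_insertBy, PySem.List.sorted_eq_foldl_insertBy]
  have main : ∀ (l : List α) (acc : List α),
      (l.map f).foldl (fun A b => PySem.List.insertBy (fun a b => decide (k a < k b)) b A) (acc.map f)
        = (l.foldl (fun A a => PySem.List.insertBy (fun a b => decide (k (f a) < k (f b))) a A) acc).map f := by
    intro l
    induction l with
    | nil => intro acc; simp
    | cons x xs ih =>
      intro acc
      simp only [List.map_cons, List.foldl_cons]
      rw [insertBy_map f (fun a b => decide (k a < k b)) x acc]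
      exact ih _
  simpa using main l []

lemma insertBy_stable {α κ τ : Type} [LinearOrder κ] [LinearOrder τ]
    (k : α → κ) (t : α → τ) (x : α) (acc : List α)
    (hp : acc.Pairwise (fun a b => k a < k b ∨ (k a = k b ∧ t a < t b)))
    (hlt : ∀ y ∈ acc, t y < t x) :
    (PySem.List.insertBy (fun a b => decide (k a < k b)) x acc).Pairwise
      (fun a b => k a < k b ∨ (k a = k b ∧ t a < t b)) := by
  induction acc with
  | nil => simp [PySem.List.insertBy]
  | cons y ys ih =>
    rcases List.pairwise_cons.mp hp with ⟨hy, hys⟩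
    by_cases h : k x < k y
    · simp only [PySem.List.insertBy, h, if_pos, decide_true]
      refine List.pairwise_cons.mpr ⟨?_, hp⟩
      intro z hz
      rcases List.mem_cons.mp hz with rfl | hz
      · exact Or.inl h
      · rcases hy z hz with h2 | ⟨h2, _⟩
        · exact Or.inl (h.trans h2)
        · exact Or.inl (h2 ▸ h)
    · simp only [PySem.List.insertBy, h, if_neg, decide_false, Bool.false_eq_true,
        not_false_iff]
      refine List.pairwise_cons.mpr ⟨?_, ih hys (fun z hz => hlt z (List.mem_cons_of_mem _ hz))⟩
      intro z hz
      rcases (PySem.List.mem_insertBy _ _ _ _).mp hz with rfl | hz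
      · rcases lt_or_eq_of_le (le_of_not_gt h) with h2 | h2
        · exact Or.inl h2
        · exact Or.inr ⟨h2, hlt y (List.mem_cons_self)⟩
      · exact hy z hz

-- STABILITY: sorting a list whose elements already strictly increase under t, by key k,
-- yields a list strictly increasing under the lexicographic (k, t).
lemma sorted_stable {α κ τ : Type} [LinearOrder κ] [LinearOrder τ]
    (k : α → κ) (t : α → τ) (l : List α)
    (h : l.Pairwise (fun a b => t a < t b)) :
    (PySem.List.sorted l k).Pairwise
      (fun a b => k a < k b ∨ (k a = k b ∧ t a < t b)) := by
  rw [PySem.List.sorted_eq_foldl_insertBy]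
  have main : ∀ (l : List α) (acc : List α),
      acc.Pairwise (fun a b => k a < k b ∨ (k a = k b ∧ t a < t b)) →
      (∀ y ∈ acc, ∀ x ∈ l, t y < t x) →
      l.Pairwise (fun a b => t a < t b) →
      (l.foldl (fun A x => PySem.List.insertBy (fun a b => decide (k a < k b)) x A) acc).Pairwise
        (fun a b => k a < k b ∨ (k a = k b ∧ t a < t b)) := by
    intro l
    induction l with
    | nil => intro acc hacc _ _; simpa using hacc
    | cons x xs ih =>
      intro acc hacc hcross hl
      rcases List.pairwise_cons.mp hl with ⟨hx, hxs⟩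
      simp only [List.foldl_cons]
      refine ih _ (insertBy_stable k t x acc hacc (fun y hy => hcross y hy x List.mem_cons_self)) ?_ hxs
      intro y hy z hz
      rcases (PySem.List.mem_insertBy _ _ _ _).mp hy with rfl | hy
      · exact hx z hz
      · exact hcross y hy z (List.mem_cons_of_mem _ hz)
  exact main l [] (List.Pairwise.nil) (by simp) h

-- A's returned list, computed: groups keyed by pvK1, keys sorted, groups sorted by the number.
lemma solution_eq_flat (files : List String) :
    solution files = (pvLA files).map (fun p => PySem.List.pyGetD files p.1 "") := by
  unfold solution pvLA
  have hbody : ∀ (d : PySem.Dict String (List (Int × Int))) (p : Int × String),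
      (let cs := p.2.toList
       let pr := aFirstLoop cs []
       let num := aSecondLoop pr.2 []
       let key : String := String.ofList (PySem.Chars.upper pr.1)
       let n : Int := (PySem.Int.ofChars? num).getD 0
       match d.get? key with
       | some l => d.insert key (l ++ [(n, p.1)])
       | none   => d.insert key [(n, p.1)]) =
      d.modify (pvK1 p.2) [] (· ++ [(pvK2 p.2, p.1)]) := by
    intro d p
    simp only [aFirstLoop_eq, aSecondLoop_eq, List.nil_append, pvK1, pvK2, PySem.Dict.modify,
      PySem.Dict.getD_eq_get?_getD]
    rcases hg : d.get? (String.ofList (PySem.Chars.upper (p.2.toList.takeWhile fun c => !PySem.Chars.isdigit c))) with _ | l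
    · simp
    · simp
  have hdict :
      ((PySem.List.pyRange 0 (PySem.List.len files) 1).foldl (fun d i =>
        let cs := (PySem.List.pyGetD files i "").toList
        let pr := aFirstLoop cs []
        let num := aSecondLoop pr.2 []
        let key : String := String.ofList (PySem.Chars.upper pr.1)
        let n : Int := (PySem.Int.ofChars? num).getD 0
        match d.get? key with
        | some l => d.insert key (l ++ [(n, i)])
        | none   => d.insert key [(n, i)]) PySem.Dict.empty) =
      ((pvE files).map (fun p => (pvK1 p.2, (pvK2 p.2, p.1)))).foldl
        (fun d q => d.modify q.1 [] (· ++ [q.2])) PySem.Dict.empty := by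
    rw [List.foldl_map]
    have he : pvE files = (PySem.List.pyRange 0 (PySem.List.len files) 1).map
        (fun j => (j, PySem.List.pyGetD files j "")) := PySem.List.enumerate_eq_map_pyRange files ""
    rw [he, List.foldl_map]
    apply PySem.List.foldl_congr_mem
    intro d i _
    exact hbody d (i, PySem.List.pyGetD files i "")
  rw [hdict]
  have hkeys :
      (((pvE files).map (fun p => (pvK1 p.2, (pvK2 p.2, p.1)))).foldl
        (fun d q => d.modify q.1 [] (· ++ [q.2])) PySem.Dict.empty).keys =
      PySem.Set.ofList ((pvE files).map (fun p => pvK1 p.2)) := by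
    have h1 := PySem.Dict.keys_foldl_modify_key
      (((pvE files).map (fun p => (pvK1 p.2, (pvK2 p.2, p.1)))))
      (fun q => q.1) ([] : List (Int × Int)) (fun _ q => (· ++ [q.2])) PySem.Dict.empty
    simp only [PySem.Dict.keys_empty] at h1
    rw [h1, List.map_map, PySem.Set.ofList_eq_foldl]
    rfl
  have hgetD : ∀ s : String,
      (((pvE files).map (fun p => (pvK1 p.2, (pvK2 p.2, p.1)))).foldl
        (fun d q => d.modify q.1 [] (· ++ [q.2])) PySem.Dict.empty).getD s [] =
      ((pvE files).filter (fun p => pvK1 p.2 == s)).map (fun p => (pvK2 p.2, p.1)) := by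
    intro s
    rw [PySem.Dict.getD_foldl_modify_append]
    simp [List.filter_map, Function.comp_def]
  dsimp only
  rw [hkeys]
  have houter : ∀ (keyList : List String) (acc : List String),
      keyList.foldl (fun ans k =>
        (PySem.List.sorted ((((pvE files).map (fun p => (pvK1 p.2, (pvK2 p.2, p.1)))).foldl
            (fun d q => d.modify q.1 [] (· ++ [q.2])) PySem.Dict.empty).getD k []) (fun x => x.1)).foldl
          (fun ans e => ans ++ [PySem.List.pyGetD files e.2 ""]) ans) acc =
      acc ++ keyList.flatMap (fun s =>
        (PySem.List.sorted ((pvE files).filter (fun p => pvK1 p.2 == s)) (fun p => pvK2 p.2)).map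
          (fun p => PySem.List.pyGetD files p.1 "")) := by
    intro keyList acc
    have hfun : ∀ (ans : List String) (k : String),
        (PySem.List.sorted ((((pvE files).map (fun p => (pvK1 p.2, (pvK2 p.2, p.1)))).foldl
            (fun d q => d.modify q.1 [] (· ++ [q.2])) PySem.Dict.empty).getD k []) (fun x => x.1)).foldl
          (fun ans e => ans ++ [PySem.List.pyGetD files e.2 ""]) ans =
        ans ++ (PySem.List.sorted ((pvE files).filter (fun p => pvK1 p.2 == k)) (fun p => pvK2 p.2)).map
          (fun p => PySem.List.pyGetD files p.1 "") := by
      intro ans k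
      rw [PySem.List.foldl_append_singleton_eq_map, hgetD k, sorted_map_comm]
      simp [List.map_map, Function.comp_def]
    calc keyList.foldl _ acc
        = keyList.foldl (fun ans s => ans ++
            (PySem.List.sorted ((pvE files).filter (fun p => pvK1 p.2 == s)) (fun p => pvK2 p.2)).map
              (fun p => PySem.List.pyGetD files p.1 "")) acc := by
          apply PySem.List.foldl_congr_mem
          intro ans k _
          exact hfun ans k
      _ = _ := PySem.List.foldl_append_eq_flatMap _ _ _
  rw [houter, List.nil_append, List.map_flatMap]

lemma pvE_nodup (files : List String) : (pvE files).Nodup :=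
  (PySem.List.pairwise_lt_enumerate files 0).imp (fun h => by rintro rfl; exact lt_irrefl _ h)

lemma pvLA_pairwise (files : List String) :
    (pvLA files).Pairwise (fun a b => pvKB a < pvKB b) := by
  unfold pvLA
  rw [List.pairwise_flatMap]
  constructor
  · intro s hs
    have hfil : ((pvE files).filter (fun p => pvK1 p.2 == s)).Pairwise (fun p q => p.1 < q.1) :=
      (PySem.List.pairwise_lt_enumerate files 0).filter _
    have hst := sorted_stable (fun p : Int × String => pvK2 p.2) (fun p => p.1) _ hfil
    refine hst.imp_of_mem ?_
    intro a b ha hb hR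
    have ha' := List.of_mem_filter ((PySem.List.mem_sorted _ _ _ _).mp ha)
    have hb' := List.of_mem_filter ((PySem.List.mem_sorted _ _ _ _).mp hb)
    have ha1 : pvK1 a.2 = s := by simpa using ha'
    have hb1 : pvK1 b.2 = s := by simpa using hb'
    rw [pvKB, pvKB, Prod.Lex.toLex_lt_toLex]
    rcases hR with h | ⟨h, h2⟩
    · exact Or.inl (by rw [Prod.Lex.toLex_lt_toLex]; exact Or.inr ⟨ha1.trans hb1.symm, h⟩)
    · have h' : pvK2 a.2 = pvK2 b.2 := h
      have h2' : a.1 < b.1 := h2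
      exact Or.inr ⟨by rw [ha1.trans hb1.symm, h'], h2'⟩
  · have hkeys := PySem.List.sorted_ofList_pairwise_lt ((pvE files).map (fun p => pvK1 p.2))
    refine hkeys.imp ?_
    intro s u hsu x hx y hy
    have hx' := List.of_mem_filter ((PySem.List.mem_sorted _ _ _ _).mp hx)
    have hy' := List.of_mem_filter ((PySem.List.mem_sorted _ _ _ _).mp hy)
    have hx1 : pvK1 x.2 = s := by simpa using hx'
    have hy1 : pvK1 y.2 = u := by simpa using hy'
    rw [pvKB, pvKB, Prod.Lex.toLex_lt_toLex]
    exact Or.inl (by rw [Prod.Lex.toLex_lt_toLex]; exact Or.inl (by rw [hx1, hy1]; exact hsu))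

lemma pvLA_perm (files : List String) : (pvLA files).Perm (pvE files) := by
  have hnodLA : (pvLA files).Nodup :=
    (pvLA_pairwise files).imp (fun h => by rintro rfl; exact lt_irrefl _ h)
  rw [List.perm_ext_iff_of_nodup hnodLA (pvE_nodup files)]
  intro a
  unfold pvLA
  simp only [List.mem_flatMap, PySem.List.mem_sorted, PySem.Set.mem_ofList, List.mem_filter,
    List.mem_map]
  constructor
  · rintro ⟨s, _, ha, _⟩; exact ha
  · intro ha
    exact ⟨pvK1 a.2, ⟨a, ha, rfl⟩, ha, by simp⟩

lemma pvLA_eq_sorted (files : List String) :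
    PySem.List.sorted (pvE files) pvKB = pvLA files :=
  PySem.List.sorted_eq_of_perm_of_pairwise_lt _ _ _ (pvLA_perm files) (pvLA_pairwise files)

lemma pvSB_eq_sorted (files : List String) :
    PySem.List.sorted (pvE files) pvKB
      = PySem.List.sorted (pvE files) (fun p => toLex (pvK1 p.2, pvK2 p.2)) := by
  apply PySem.List.sorted_eq_of_perm_of_pairwise_lt
  · exact PySem.List.sorted_perm _ _ _
  · have hst := sorted_stable (fun p : Int × String => toLex (pvK1 p.2, pvK2 p.2)) (fun p => p.1)
      (pvE files) (PySem.List.pairwise_lt_enumerate files 0)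
    refine hst.imp ?_
    intro a b hR
    rw [pvKB, pvKB, Prod.Lex.toLex_lt_toLex]
    exact hR

lemma solution_alt_eq (files : List String) :
    solution_alt files = (PySem.List.sorted (pvE files) pvKB).map (fun p => p.2) := by
  unfold solution_alt
  rw [show bKey1 = pvK1 from funext bKey1_eq, show bKey2 = pvK2 from funext bKey2_eq,
    sorted2_eq_sorted_lex]
  conv_lhs => rw [show files = (pvE files).map (fun p => p.2) from
    (PySem.List.map_snd_enumerate files 0).symm]
  rw [sorted_map_comm, pvSB_eq_sorted]

lemma final_map (files : List String) :
    ((pvLA files).map (fun p => PySem.List.pyGetD files p.1 ""))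
      = (pvLA files).map (fun p => p.2) := by
  apply List.map_congr_left
  intro p hp
  have hpE : p ∈ pvE files := (List.Perm.mem_iff (pvLA_perm files)).mp hp
  rcases (PySem.List.mem_enumerate_iff files 0 p).mp hpE with ⟨k, hk, rfl⟩
  simp [PySem.List.pyGetD_natCast, List.getD_eq_getElem?_getD, List.getElem?_eq_getElem hk]

-- ===== VERDICT (by name: the statement is the Claim_ definition above) =====
theorem solution_spec : Claim_equal_solution := by
  intro files _ _
  unfold Spec_solution
  calc solution files
      = (pvLA files).map (fun p => PySem.List.pyGetD files p.1 "") := solution_eq_flat files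
    _ = (pvLA files).map (fun p => p.2) := final_map files
    _ = (PySem.List.sorted (pvE files) pvKB).map (fun p => p.2) := by rw [pvLA_eq_sorted]
    _ = solution_alt files := (solution_alt_eq files).symm
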